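-- pv_equiv track=rewrite | github.com/doocs/leetcode | lcp/LCP 80. 生物进化录/Solution.py | evolutionaryRecord
-- ===== SOURCE A (Python) =====
-- from typing import List
--
-- def evolutionaryRecord(parents: List[int]) -> str:
--     def dfs(i: int) -> str:
--         t = sorted(dfs(j) for j in g[i])
--         return "0" + "".join(t) + "1"
--
--     n = len(parents)
--     g = [[] for _ in range(n)]
--     for i in range(1, n):
--         g[parents[i]].append(i)
--     return dfs(0)[1:].rstrip("1")
-- ===== SOURCE B (Python) =====
-- from typing import List
--
-- def evolutionaryRecord(parents: List[int]) -> str: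
--     n = len(parents)
--     g = [[] for _ in range(n)]
--     for i in range(1, n):
--         g[parents[i]].append(i)
--     # iterative BFS from the root: every child sits in a strictly later level
--     order = []
--     level = [0]
--     for _ in range(n):
--         order.extend(level)
--         level = [j for i in level for j in g[i]]
--     # fill encodings bottom-up: reverse BFS order encodes all children first
--     memo = [""] * n
--     for i in reversed(order):
--         memo[i] = "0" + "".join(sorted(memo[j] for j in g[i])) + "1"
--     return memo[0][1:].rstrip("1")
-- ===== Notes on version B (the rewrite author's own statement) =====
-- stated objective: alternative
-- what changed: Replaces A's recursive dfs by an iterative computation: a BFS from the root lists the nodes level by level, and a memo array is then filled in reverse BFS order, so every child's encoding exists before its parent's is assembled; no recursion is used.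
import Mathlib
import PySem

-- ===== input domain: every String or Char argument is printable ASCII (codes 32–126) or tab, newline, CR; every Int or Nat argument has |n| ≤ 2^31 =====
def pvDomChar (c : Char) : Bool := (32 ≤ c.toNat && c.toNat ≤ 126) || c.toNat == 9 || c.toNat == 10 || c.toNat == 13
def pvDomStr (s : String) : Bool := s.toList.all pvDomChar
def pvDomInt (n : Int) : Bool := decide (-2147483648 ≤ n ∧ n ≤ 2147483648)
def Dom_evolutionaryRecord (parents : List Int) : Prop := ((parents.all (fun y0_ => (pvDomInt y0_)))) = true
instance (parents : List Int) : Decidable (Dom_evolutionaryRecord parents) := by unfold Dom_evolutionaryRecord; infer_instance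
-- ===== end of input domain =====

-- B replaces A's recursive DFS by an iterative BFS order plus a bottom-up memo fill
-- (reverse BFS order), same return value; objective: alternative decomposition.

-- ===== PORT A =====
-- 'g[p].append(v)' with Python index semantics; exact for -len(g) ≤ p < len(g)
-- (IndexError outside that range, excluded by Pre_).
def pyAppendAt (g : List (List Int)) (p : Int) (v : Int) : List (List Int) :=
  let i : Int := if p < 0 then p + g.length else p
  if 0 ≤ i ∧ i < g.length then g.modify i.toNat (fun l => l ++ [v]) else g

-- 'g = [[] for _ in range(n)]; for i in range(1, n): g[parents[i]].append(i)'
-- (these two source lines appear verbatim in both A and B)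
def buildG (parents : List Int) : List (List Int) :=
  (PySem.List.pyRange 1 parents.length 1).foldl
    (fun g i => pyAppendAt g (PySem.List.pyGetD parents i 0) i)
    (List.replicate parents.length [])

-- '"0" + "".join(sorted(es)) + "1"' (strings on the List Char side)
def encNode (es : List (List Char)) : List Char :=
  '0' :: PySem.Chars.join [] (PySem.List.sorted es (fun s => s) false) ++ ['1']

-- 's.rstrip("1")': hand port, exact — drop the trailing '1' characters
def rstrip1 (s : List Char) : List Char :=
  (s.reverse.dropWhile (fun c => c == '1')).reverse

-- A's recursive 'dfs', with a fuel guard making it total; with fuel = len(parents)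
-- the guard is never reached on inputs satisfying Pre_.
def dfsA (g : List (List Int)) : Nat → Int → List Char
  | 0, _ => []
  | fuel+1, i => encNode ((PySem.List.pyGetD g i []).map (fun j => dfsA g fuel j))

def evolutionaryRecord (parents : List Int) : String :=
  let g := buildG parents
  String.ofList (rstrip1 (PySem.List.slice (dfsA g parents.length 0) (some 1) none))

-- ===== PORT B =====
-- one body of B's BFS loop: 'order.extend(level); level = [j for i in level for j in g[i]]'
def bfsStep (g : List (List Int)) (s : List Int × List Int) : List Int × List Int :=
  (s.1 ++ s.2, s.2.flatMap (fun i => PySem.List.pyGetD g i []))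

-- one body of B's memo loop: 'memo[i] = "0" + "".join(sorted(memo[j] for j in g[i])) + "1"'
def memoStep (g : List (List Int)) (memo : List (List Char)) (i : Int) : List (List Char) :=
  PySem.List.pySetD memo i
    (encNode ((PySem.List.pyGetD g i []).map (fun j => PySem.List.pyGetD memo j [])))

def evolutionaryRecord_alt (parents : List Int) : String :=
  let n := parents.length
  let g := buildG parents
  let bfs := (List.range n).foldl (fun s _ => bfsStep g s) ([], [0])
  let memo := bfs.1.reverse.foldl (memoStep g) (List.replicate n [])
  String.ofList (rstrip1 (PySem.List.slice (PySem.List.pyGetD memo 0 []) (some 1) none))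

-- ===== PRECONDITION & SPEC =====
-- Pre_: exactly the inputs where Python A returns normally: a nonempty list whose
-- entries parents[1..] are valid Python indexes into g (A raises IndexError otherwise).
def Pre_evolutionaryRecord (parents : List Int) : Prop :=
  parents ≠ [] ∧
  ∀ i, i < parents.length → 1 ≤ i →
    PySem.Raise.InRange parents.length (parents.getD i 0)
instance (parents : List Int) : Decidable (Pre_evolutionaryRecord parents) := by
  unfold Pre_evolutionaryRecord; infer_instance

def pvWitness_evolutionaryRecord : List Int := [0, 0, 1]

def Spec_evolutionaryRecord (parents : List Int) (out : String) : Prop :=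
  out = evolutionaryRecord_alt parents
instance (parents : List Int) (out : String) : Decidable (Spec_evolutionaryRecord parents out) := by
  unfold Spec_evolutionaryRecord; infer_instance

-- ===== CLAIM (what is proved, stated in full; the proofs are below) =====
def Claim_equal_evolutionaryRecord : Prop :=
  ∀ (parents : List Int), Dom_evolutionaryRecord parents →
    Pre_evolutionaryRecord parents →
    Spec_evolutionaryRecord parents (evolutionaryRecord parents)

-- ===== LEMMAS AND PROOFS =====

-- the (normalized) parent index A appends node j to: 'parents[j]' as a Python index
def pvPar (parents : List Int) (j : Int) : Int :=
  if PySem.List.pyGetD parents j 0 < 0 then PySem.List.pyGetD parents j 0 + parents.length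
  else PySem.List.pyGetD parents j 0

-- BFS levels of the children graph: level 0 = [0], level (k+1) = children of level k
def pvLev (g : List (List Int)) : Nat → List Int
  | 0 => [0]
  | k+1 => (pvLev g k).flatMap (fun i => PySem.List.pyGetD g i [])

theorem length_pyAppendAt (g : List (List Int)) (p v : Int) :
    (pyAppendAt g p v).length = g.length := by
  unfold pyAppendAt
  dsimp only
  split <;> split <;> simp [List.length_modify]

-- pyGetD at a nonnegative in-range index is getD at its toNat
theorem pvGet {α : Type} (xs : List α) (i : Int) (d : α)
    (h0 : 0 ≤ i) (h1 : i < xs.length) :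
    PySem.List.pyGetD xs i d = xs.getD i.toNat d := by
  have h2 : i.toNat < xs.length := by omega
  rw [PySem.List.pyGetD_eq_getElem xs d h0 h1]
  simp [List.getD, List.getElem?_eq_getElem h2]

theorem getD_pyAppendAt (g : List (List Int)) (p v : Int)
    (h0 : 0 ≤ (if p < 0 then p + g.length else p))
    (h1 : (if p < 0 then p + g.length else p) < g.length) (t : Nat) :
    (pyAppendAt g p v).getD t [] =
      if t = (if p < 0 then p + (g.length : Int) else p).toNat then g.getD t [] ++ [v]
      else g.getD t [] := by
  unfold pyAppendAt
  dsimp only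
  rw [if_pos ⟨h0, h1⟩]
  show ((g.modify _ _)[t]?).getD [] = _
  rw [List.getElem?_modify]
  by_cases hc : t = (if p < 0 then p + (g.length : Int) else p).toNat
  · rw [if_pos hc]
    have ht : t < g.length := by omega
    simp [← hc, List.getElem?_eq_getElem ht, List.getD, Option.getD]
  · rw [if_neg hc]
    have : ¬ ((if p < 0 then p + (g.length : Int) else p).toNat = t) := fun h => hc h.symm
    simp [this, List.getD]

-- invariant of the building loop after processing i = 1 .. t-1
def pvGood (parents : List Int) (g : List (List Int)) (t : Nat) : Prop :=
  g.length = parents.length ∧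
  ∀ a : Nat, a < parents.length →
    (∀ j ∈ g.getD a [], 1 ≤ j ∧ j < (t : Int) ∧ pvPar parents j = (a : Int)) ∧
    (g.getD a []).Pairwise (· < ·)

theorem buildG_good (parents : List Int) (hpre : Pre_evolutionaryRecord parents) :
    pvGood parents (buildG parents) parents.length := by
  obtain ⟨hne, hidx⟩ := hpre
  have base : ∀ t : Nat, pvGood parents (List.replicate parents.length ([] : List Int)) t := by
    intro t
    refine ⟨by simp, ?_⟩
    intro a ha
    rw [List.getD_replicate _ ha]
    exact ⟨by simp, by simp⟩
  suffices H : ∀ t : Nat, t ≤ parents.length →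
      pvGood parents
        ((PySem.List.pyRange 1 (t : Int) 1).foldl
          (fun g i => pyAppendAt g (PySem.List.pyGetD parents i 0) i)
          (List.replicate parents.length [])) t by
    have := H parents.length le_rfl
    unfold buildG
    exact this
  intro t
  induction t with
  | zero =>
    intro _
    rw [PySem.List.pyRange_one_eq_nil (by norm_num)]
    exact base 0
  | succ t ih =>
    intro hle
    rcases Nat.eq_zero_or_pos t with rfl | htpos
    · rw [PySem.List.pyRange_one_eq_nil (by push_cast)]
      exact base _
    · have ht1 : (1 : Int) ≤ (t : Int) := by exact_mod_cast htpos
      have hcast : ((t+1 : Nat) : Int) = (t : Int) + 1 := by push_cast; ring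
      rw [hcast, PySem.List.pyRange_one_succ_right ht1, List.foldl_append]
      obtain ⟨ihl, ihm⟩ := ih (Nat.le_of_succ_le hle)
      set G := (PySem.List.pyRange 1 (t : Int) 1).foldl
          (fun g i => pyAppendAt g (PySem.List.pyGetD parents i 0) i)
          (List.replicate parents.length []) with hG
      simp only [List.foldl_cons, List.foldl_nil]
      have hp : PySem.List.pyGetD parents (t : Int) 0 = parents.getD t 0 :=
        PySem.List.pyGetD_natCast parents t 0
      have hrange := hidx t (by omega) (by omega)
      have hIR : -(parents.length : Int) ≤ parents.getD t 0 ∧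
          parents.getD t 0 < parents.length := by
        simpa [PySem.Raise.InRange] using hrange
      set p := parents.getD t 0 with hpdef
      have hb0 : 0 ≤ (if p < 0 then p + (G.length : Int) else p) := by
        rw [ihl]; split <;> omega
      have hb1 : (if p < 0 then p + (G.length : Int) else p) < G.length := by
        rw [ihl]; split <;> omega
      have hparT : pvPar parents (t : Int) =
          (if p < 0 then p + (G.length : Int) else p) := by
        unfold pvPar
        rw [hp, ihl]
      constructor
      · rw [length_pyAppendAt, ihl]
      · intro a ha
        rw [hp, getD_pyAppendAt G p (t : Int) hb0 hb1 a]
        by_cases hat : a = (if p < 0 then p + (G.length : Int) else p).toNat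
        · rw [if_pos hat]
          obtain ⟨hmem, hpw⟩ := ihm a ha
          constructor
          · intro j hj
            rcases List.mem_append.mp hj with hjold | hjnew
            · obtain ⟨hj1, hj2, hj3⟩ := hmem j hjold
              exact ⟨hj1, by push_cast; omega, hj3⟩
            · rcases List.mem_singleton.mp hjnew with rfl
              refine ⟨by exact_mod_cast htpos, by push_cast; omega, ?_⟩
              rw [hparT, hat]
              rw [ihl] at hb0 ⊢
              omega
          · rw [List.pairwise_append]
            refine ⟨hpw, by simp, ?_⟩
            intro x hx b hb
            rcases List.mem_singleton.mp hb with rfl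
            exact (hmem x hx).2.1
        · rw [if_neg hat]
          obtain ⟨hmem, hpw⟩ := ihm a ha
          refine ⟨?_, hpw⟩
          intro j hj
          obtain ⟨hj1, hj2, hj3⟩ := hmem j hj
          exact ⟨hj1, by push_cast; omega, hj3⟩

theorem lev_mem (parents : List Int) (hpre : Pre_evolutionaryRecord parents) :
    ∀ k, ∀ j ∈ pvLev (buildG parents) k,
      0 ≤ j ∧ j < (parents.length : Int) ∧ (1 ≤ k → 1 ≤ j) := by
  obtain ⟨hgl, hgm⟩ := buildG_good parents hpre
  have hn : 0 < parents.length := by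
    rcases hpre with ⟨hne, -⟩
    exact List.length_pos_iff.mpr hne
  intro k
  induction k with
  | zero =>
    intro j hj
    rcases List.mem_singleton.mp hj with rfl
    exact ⟨le_rfl, by exact_mod_cast hn, by omega⟩
  | succ k ih =>
    intro j hj
    obtain ⟨i, hi, hji0⟩ := List.mem_flatMap.mp hj
    obtain ⟨hi0, hi1, -⟩ := ih i hi
    have hji : j ∈ PySem.List.pyGetD (buildG parents) i [] := hji0
    rw [pvGet _ _ _ hi0 (by rw [hgl]; exact_mod_cast hi1)] at hji
    obtain ⟨hj1, hj2, -⟩ := (hgm i.toNat (by omega)).1 j hji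
    exact ⟨by omega, hj2, fun _ => hj1⟩

theorem lev_par (parents : List Int) (hpre : Pre_evolutionaryRecord parents) :
    ∀ k, ∀ j ∈ pvLev (buildG parents) (k+1),
      pvPar parents j ∈ pvLev (buildG parents) k := by
  obtain ⟨hgl, hgm⟩ := buildG_good parents hpre
  intro k j hj
  obtain ⟨i, hi, hji0⟩ := List.mem_flatMap.mp hj
  obtain ⟨hi0, hi1, -⟩ := lev_mem parents hpre k i hi
  have hji : j ∈ PySem.List.pyGetD (buildG parents) i [] := hji0
  rw [pvGet _ _ _ hi0 (by rw [hgl]; exact_mod_cast hi1)] at hji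
  have := (hgm i.toNat (by omega)).1 j hji
  have hcast : ((i.toNat : Nat) : Int) = i := by omega
  rw [this.2.2, hcast]
  exact hi

theorem lev_disjoint (parents : List Int) (hpre : Pre_evolutionaryRecord parents) :
    ∀ k k', k < k' → ∀ j, j ∈ pvLev (buildG parents) k →
      j ∉ pvLev (buildG parents) k' := by
  intro k
  induction k with
  | zero =>
    intro k' hk j hj hj'
    rcases List.mem_singleton.mp hj with rfl
    have := (lev_mem parents hpre k' 0 hj').2.2 (by omega)
    omega
  | succ k ih =>
    intro k' hk j hj hj'
    rcases Nat.exists_eq_succ_of_ne_zero (n := k') (by omega) with ⟨k'', rfl⟩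
    exact ih k'' (by omega) (pvPar parents j) (lev_par parents hpre k j hj)
      (lev_par parents hpre k'' j hj')

theorem lev_nodup (parents : List Int) (hpre : Pre_evolutionaryRecord parents) :
    ∀ k, (pvLev (buildG parents) k).Nodup := by
  obtain ⟨hgl, hgm⟩ := buildG_good parents hpre
  intro k
  induction k with
  | zero => simp [pvLev]
  | succ k ih =>
    show ((pvLev (buildG parents) k).flatMap
      (fun i => PySem.List.pyGetD (buildG parents) i [])).Nodup
    rw [List.nodup_flatMap]
    constructor
    · intro i hi
      obtain ⟨hi0, hi1, -⟩ := lev_mem parents hpre k i hi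
      show (PySem.List.pyGetD (buildG parents) i []).Nodup
      rw [pvGet _ _ _ hi0 (by rw [hgl]; exact_mod_cast hi1)]
      exact ((hgm i.toNat (by omega)).2).imp (fun h => ne_of_lt h)
    · refine List.Pairwise.imp_of_mem ?_ ih
      intro a b ha hb hab x hxa0 hxb0
      obtain ⟨ha0, ha1, -⟩ := lev_mem parents hpre k a ha
      obtain ⟨hb0, hb1, -⟩ := lev_mem parents hpre k b hb
      have hxa : x ∈ PySem.List.pyGetD (buildG parents) a [] := hxa0
      have hxb : x ∈ PySem.List.pyGetD (buildG parents) b [] := hxb0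
      rw [pvGet _ _ _ ha0 (by rw [hgl]; exact_mod_cast ha1)] at hxa
      rw [pvGet _ _ _ hb0 (by rw [hgl]; exact_mod_cast hb1)] at hxb
      have h1 := ((hgm a.toNat (by omega)).1 x hxa).2.2
      have h2 := ((hgm b.toNat (by omega)).1 x hxb).2.2
      apply hab
      omega

theorem lev_pigeon (parents : List Int) (hpre : Pre_evolutionaryRecord parents) :
    pvLev (buildG parents) parents.length = [] := by
  set n := parents.length with hn
  by_contra h
  -- every level up to n is then nonempty
  have prop : ∀ m, pvLev (buildG parents) m = [] →
      ∀ i, pvLev (buildG parents) (m + i) = [] := by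
    intro m hm i
    induction i with
    | zero => exact hm
    | succ i ih => show (pvLev (buildG parents) (m+i)).flatMap _ = []; rw [ih]; rfl
  have hne : ∀ m, m ≤ n → pvLev (buildG parents) m ≠ [] := by
    intro m hm hcon
    exact h (by rw [show n = m + (n - m) by omega]; exact prop m hcon (n - m))
  set all := (List.range (n+1)).flatMap (pvLev (buildG parents)) with hall
  have hnd : all.Nodup := by
    rw [hall, List.nodup_flatMap]
    refine ⟨fun k _ => lev_nodup parents hpre k, ?_⟩
    refine List.Pairwise.imp ?_ List.pairwise_lt_range
    intro k k' hkk x hx hx'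
    exact lev_disjoint parents hpre k k' hkk x hx hx'
  have hlen : n + 1 ≤ all.length := by
    rw [hall, List.length_flatMap]
    calc n + 1 = (List.range (n+1)).length := by simp
    _ = ((List.range (n+1)).map
          (fun k => (pvLev (buildG parents) k).length)).length := by simp
    _ ≤ _ := by
        apply List.length_le_sum_of_one_le
        intro x hx
        obtain ⟨k, hk, rfl⟩ := List.mem_map.mp hx
        have := hne k (by simpa using Nat.lt_succ_iff.mp (List.mem_range.mp hk))
        have : 0 < (pvLev (buildG parents) k).length := List.length_pos_iff.mpr this
        omega
  have hsub : all.toFinset ⊆ Finset.Ico (0 : Int) (n : Int) := by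
    intro x hx
    rw [List.mem_toFinset, hall] at hx
    obtain ⟨k, -, hxk⟩ := List.mem_flatMap.mp hx
    obtain ⟨h0, h1, -⟩ := lev_mem parents hpre k x hxk
    simp [Finset.mem_Ico]
    omega
  have hcard : all.toFinset.card = all.length := List.toFinset_card_of_nodup hnd
  have := Finset.card_le_card hsub
  rw [hcard, Int.card_Ico] at this
  omega

theorem foldl_memoStep_preserve (g : List (List Int)) :
    ∀ (xs : List Int) (memo : List (List Char)) (p : Nat),
      (∀ x ∈ xs, 0 ≤ x ∧ x.toNat ≠ p) →
      (xs.foldl (memoStep g) memo).getD p [] = memo.getD p [] := by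
  intro xs
  induction xs with
  | nil => intro memo p _; rfl
  | cons x rest ih =>
    intro memo p hx
    rw [List.foldl_cons, ih _ p (fun r hr => hx r (List.mem_cons_of_mem _ hr))]
    obtain ⟨hx0, hxp⟩ := hx x List.mem_cons_self
    unfold memoStep
    rw [PySem.List.pySetD_of_nonneg _ _ hx0]
    simp [List.getD, List.getElem?_set_ne hxp]

theorem memo_inner (parents : List Int) (hpre : Pre_evolutionaryRecord parents)
    (m : Nat) (hm : m < parents.length) :
    ∀ (xs : List Int) (memo : List (List Char)), xs.Nodup →
      (∀ x ∈ xs, x ∈ pvLev (buildG parents) m) →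
      memo.length = parents.length →
      (∀ k, m < k → k < parents.length → ∀ j ∈ pvLev (buildG parents) k,
        memo.getD j.toNat [] = dfsA (buildG parents) (parents.length - k) j) →
      (xs.foldl (memoStep (buildG parents)) memo).length = parents.length ∧
      (∀ k, m < k → k < parents.length → ∀ j ∈ pvLev (buildG parents) k,
        (xs.foldl (memoStep (buildG parents)) memo).getD j.toNat [] =
          dfsA (buildG parents) (parents.length - k) j) ∧
      (∀ j ∈ xs,
        (xs.foldl (memoStep (buildG parents)) memo).getD j.toNat [] =
          dfsA (buildG parents) (parents.length - m) j) := by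
  set n := parents.length with hn
  set g := buildG parents with hg
  intro xs
  induction xs with
  | nil =>
    intro memo _ _ hlen H
    exact ⟨hlen, H, by simp⟩
  | cons x rest ih =>
    intro memo hnd hsub hlen H
    have hx : x ∈ pvLev g m := hsub x List.mem_cons_self
    obtain ⟨hx0, hx1, -⟩ := lev_mem parents hpre m x hx
    have hkids : ∀ c ∈ PySem.List.pyGetD g x [], c ∈ pvLev g (m+1) := by
      intro c hc
      exact List.mem_flatMap.mpr ⟨x, hx, hc⟩
    have hval : (PySem.List.pyGetD g x []).map (fun j => PySem.List.pyGetD memo j []) =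
        (PySem.List.pyGetD g x []).map (fun j => dfsA g (n - (m+1)) j) := by
      apply List.map_congr_left
      intro c hc
      have hcl := hkids c hc
      rcases Nat.lt_or_ge (m+1) n with h1 | h1
      · obtain ⟨hc0, hc1, -⟩ := lev_mem parents hpre (m+1) c hcl
        rw [pvGet memo c [] hc0 (by rw [hlen]; exact_mod_cast hc1)]
        exact H (m+1) (Nat.lt_succ_self m) h1 c hcl
      · exfalso
        have hmn : m + 1 = n := by omega
        rw [hmn, hn] at hcl
        rw [lev_pigeon parents hpre] at hcl
        exact (List.not_mem_nil) hcl
    have hwrite : memoStep g memo x = PySem.List.pySetD memo x (dfsA g (n - m) x) := by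
      unfold memoStep
      rw [hval]
      congr 1
      have hd : n - m = (n - (m+1)) + 1 := by omega
      rw [hd]
      rfl
    have hlen' : (PySem.List.pySetD memo x (dfsA g (n - m) x)).length = n := by
      rw [PySem.List.pySetD_of_nonneg _ _ hx0]
      simp [hlen]
    have H' : ∀ k, m < k → k < n → ∀ j ∈ pvLev g k,
        (PySem.List.pySetD memo x (dfsA g (n - m) x)).getD j.toNat [] =
          dfsA g (n - k) j := by
      intro k hk1 hk2 j hj
      obtain ⟨hj0, hj1, -⟩ := lev_mem parents hpre k j hj
      have hne : j ≠ x := by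
        intro hjx
        exact lev_disjoint parents hpre m k hk1 x hx (hjx ▸ hj)
      have hnn : x.toNat ≠ j.toNat := by omega
      rw [PySem.List.pySetD_of_nonneg _ _ hx0]
      simp only [List.getD, List.getElem?_set_ne hnn]
      exact H k hk1 hk2 j hj
    obtain ⟨ihl, ihH, ihX⟩ := ih (PySem.List.pySetD memo x (dfsA g (n - m) x))
      (List.nodup_cons.mp hnd).2
      (fun r hr => hsub r (List.mem_cons_of_mem _ hr)) hlen' H'
    have hfold : (x :: rest).foldl (memoStep g) memo =
        rest.foldl (memoStep g) (PySem.List.pySetD memo x (dfsA g (n - m) x)) := by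
      rw [List.foldl_cons, hwrite]
    refine ⟨by rw [hfold]; exact ihl, by rw [hfold]; exact ihH, ?_⟩
    intro j hj
    rcases List.mem_cons.mp hj with rfl | hj'
    · rw [hfold]
      have hpres : ∀ r ∈ rest, 0 ≤ r ∧ r.toNat ≠ j.toNat := by
        intro r hr
        obtain ⟨hr0, -, -⟩ := lev_mem parents hpre m r (hsub r (List.mem_cons_of_mem _ hr))
        have hrj : r ≠ j := by
          intro hrj
          exact (List.nodup_cons.mp hnd).1 (hrj ▸ hr)
        exact ⟨hr0, by omega⟩
      rw [foldl_memoStep_preserve g rest _ j.toNat hpres]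
      rw [PySem.List.pySetD_of_nonneg _ _ hx0]
      have hjl : j.toNat < memo.length := by rw [hlen]; omega
      simp [List.getD, List.getElem?_set_self hjl]
    · rw [hfold]
      exact ihX j hj'

-- the memo list after processing levels m .. n-1 in reverse order
def pvSuf (g : List (List Int)) (n m : Nat) : List (List Char) :=
  (((List.range' m (n - m)).flatMap (pvLev g)).reverse).foldl (memoStep g)
    (List.replicate n [])

theorem suf_spec (parents : List Int) (hpre : Pre_evolutionaryRecord parents) :
    ∀ d m, m = parents.length - d → d ≤ parents.length →
      (pvSuf (buildG parents) parents.length m).length = parents.length ∧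
      (∀ k, m ≤ k → k < parents.length → ∀ j ∈ pvLev (buildG parents) k,
        (pvSuf (buildG parents) parents.length m).getD j.toNat [] =
          dfsA (buildG parents) (parents.length - k) j) := by
  set n := parents.length with hn
  set g := buildG parents with hg
  intro d
  induction d with
  | zero =>
    intro m hm _
    subst hm
    unfold pvSuf
    rw [Nat.sub_zero, Nat.sub_self]
    constructor
    · simp
    · intro k hk1 hk2
      omega
  | succ d ihd =>
    intro m hm hdn
    have hmn : m < n := by omega
    have hm1 : m + 1 = n - d := by omega
    obtain ⟨ihl, ihH⟩ := ihd (m+1) hm1 (by omega)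
    have hsplit : pvSuf g n m =
        ((pvLev g m).reverse).foldl (memoStep g) (pvSuf g n (m+1)) := by
      unfold pvSuf
      rw [show n - m = (n - (m+1)) + 1 by omega, List.range'_succ,
        List.flatMap_cons, List.reverse_append, List.foldl_append]
    have hinner := memo_inner parents hpre m hmn ((pvLev g m).reverse)
      (pvSuf g n (m+1)) (List.nodup_reverse.mpr (lev_nodup parents hpre m))
      (fun x hx => List.mem_reverse.mp hx) ihl
      (fun k hk1 hk2 j hj => ihH k hk1 hk2 j hj)
    obtain ⟨h1, h2, h3⟩ := hinner
    rw [← hsplit] at h1 h2 h3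
    refine ⟨h1, ?_⟩
    intro k hk1 hk2 j hj
    rcases Nat.eq_or_lt_of_le hk1 with rfl | hlt
    · exact h3 j (List.mem_reverse.mpr hj)
    · exact h2 k hlt hk2 j hj

theorem bfs_fold (g : List (List Int)) :
    ∀ m, (List.range m).foldl (fun s _ => bfsStep g s) ([], [0]) =
      ((List.range m).flatMap (pvLev g), pvLev g m) := by
  intro m
  induction m with
  | zero => simp [pvLev]
  | succ m ih =>
    rw [List.range_succ, List.foldl_append, ih]
    simp only [List.foldl_cons, List.foldl_nil, List.flatMap_append,
      List.flatMap_cons, List.flatMap_nil, List.append_nil]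
    rfl

-- ===== VERDICT (by name: the statement is the Claim_ definition above) =====
theorem evolutionaryRecord_spec : Claim_equal_evolutionaryRecord := by
  intro parents hdom hpre
  unfold Spec_evolutionaryRecord evolutionaryRecord evolutionaryRecord_alt
  dsimp only
  rw [bfs_fold (buildG parents) parents.length]
  have hn : 0 < parents.length := by
    rcases hpre with ⟨hne, -⟩
    exact List.length_pos_iff.mpr hne
  have hsuf : pvSuf (buildG parents) parents.length 0 =
      (((List.range parents.length).flatMap (pvLev (buildG parents))).reverse).foldl
        (memoStep (buildG parents)) (List.replicate parents.length []) := by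
    unfold pvSuf
    rw [Nat.sub_zero, List.range_eq_range']
  obtain ⟨-, hspec⟩ := suf_spec parents hpre parents.length 0 (by omega) le_rfl
  have hroot := hspec 0 (Nat.zero_le 0) hn 0 (by simp [pvLev])
  rw [hsuf] at hroot
  rw [PySem.List.pyGetD_zero]
  rw [show ((0:Int).toNat) = 0 from rfl] at hroot
  rw [hroot, Nat.sub_zero]
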